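-- pv_equiv track=rewrite | github.com/daisykha/pythonSimpleProgram | stringAndPatterns2.py | printBasePattern
-- ===== SOURCE A (Python) =====
-- def printBasePattern(n,p1,p2):
--     s=""
--     for i in range(n):
--         for j in range(n):
--             if i == j or i == n - j -1 :
--                 s=s+p1
--             else:
--                 s=s+p2
--         s=s+"\n"
--     return s
-- ===== SOURCE B (Python) =====
-- def printBasePattern(n, p1, p2):
--     def row(i):
--         a, b = min(i, n - 1 - i), max(i, n - 1 - i)
--         if a == b:
--             return p2 * a + p1 + p2 * (n - 1 - a)
--         return p2 * a + p1 + p2 * (b - a - 1) + p1 + p2 * (n - 1 - b)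
--     return "".join(row(i) + "\n" for i in range(n))
-- ===== Notes on version B (the rewrite author's own statement) =====
-- stated objective: alternative
-- what changed: B builds each row as a closed-form concatenation of string-repetition segments (p2-runs around the p1 positions at min/max of i and n-1-i), joined over the rows; A's inner per-cell loop testing every (i,j) against the diagonal conditions is gone.
import Mathlib
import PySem

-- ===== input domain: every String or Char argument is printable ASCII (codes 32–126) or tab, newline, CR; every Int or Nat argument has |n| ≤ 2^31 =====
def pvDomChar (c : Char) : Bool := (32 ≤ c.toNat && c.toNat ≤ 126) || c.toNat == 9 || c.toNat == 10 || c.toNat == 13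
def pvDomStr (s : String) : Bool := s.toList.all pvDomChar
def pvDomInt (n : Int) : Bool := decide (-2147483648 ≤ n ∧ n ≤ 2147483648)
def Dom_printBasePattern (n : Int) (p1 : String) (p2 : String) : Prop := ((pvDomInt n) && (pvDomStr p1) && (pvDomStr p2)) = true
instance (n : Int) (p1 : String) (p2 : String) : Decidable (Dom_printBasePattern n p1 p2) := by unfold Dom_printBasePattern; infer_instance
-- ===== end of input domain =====

-- B builds each row in closed form as a concatenation of repeated-p2 segments around the
-- p1 positions min(i,n-1-i) and max(i,n-1-i); A's inner per-cell diagonal test is gone.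
-- Objective: alternative decomposition (no speed claim). Return values proved equal on all inputs.

-- ===== PORT A =====
-- accumulator kept as List Char; String.mk at the end (exact: Python str concatenation)
def printBasePattern (n : Int) (p1 : String) (p2 : String) : String :=
  String.mk ((PySem.List.pyRange 0 n 1).foldl (fun s i =>
    ((PySem.List.pyRange 0 n 1).foldl (fun s j =>
      if i = j ∨ i = n - j - 1 then s ++ p1.toList else s ++ p2.toList) s) ++ ['\n']) [])

-- ===== PORT B =====
-- Python's 'p2 * k' (string repetition, k clamped at 0)
def pvRep (k : Int) (l : List Char) : List Char := (List.replicate k.toNat l).flatten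

def pvRow (n i : Int) (p1 p2 : List Char) : List Char :=
  let a := min i (n - 1 - i)
  let b := max i (n - 1 - i)
  if a = b then pvRep a p2 ++ p1 ++ pvRep (n - 1 - a) p2
  else pvRep a p2 ++ p1 ++ pvRep (b - a - 1) p2 ++ p1 ++ pvRep (n - 1 - b) p2

def printBasePattern_alt (n : Int) (p1 : String) (p2 : String) : String :=
  String.mk (((PySem.List.pyRange 0 n 1).map (fun i => pvRow n i p1.toList p2.toList ++ ['\n'])).flatten)

-- ===== PRECONDITION & SPEC =====
def Spec_printBasePattern (n : Int) (p1 : String) (p2 : String) (out : String) : Prop := out = printBasePattern_alt n p1 p2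
instance (n : Int) (p1 : String) (p2 : String) (out : String) : Decidable (Spec_printBasePattern n p1 p2 out) := by unfold Spec_printBasePattern; infer_instance

-- ===== CLAIM (what is proved, stated in full; the proofs are below) =====
def Claim_equal_printBasePattern : Prop := ∀ (n : Int) (p1 : String) (p2 : String), Dom_printBasePattern n p1 p2 → Spec_printBasePattern n p1 p2 (printBasePattern n p1 p2)

-- ===== LEMMAS AND PROOFS =====

-- a range on which f is constantly p2 maps to a replicate
theorem pv_map_const (a b : Int) (f : Int → List Char) (p2 : List Char)
    (h : ∀ j, a ≤ j → j < b → f j = p2) :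
    (PySem.List.pyRange a b 1).map f = List.replicate (b - a).toNat p2 := by
  rw [List.eq_replicate_iff]
  constructor
  · simp [PySem.List.length_pyRange_one]
  · intro x hx
    rcases List.mem_map.1 hx with ⟨j, hj, rfl⟩
    rcases (PySem.List.mem_pyRange_one).1 hj with ⟨h1, h2⟩
    exact h j h1 h2

-- flatten of the whole row when f hits p1 exactly once, at position a
theorem pv_one (n a : Int) (f : Int → List Char) (p1 p2 : List Char)
    (h0 : 0 ≤ a) (han : a < n) (hfa : f a = p1)
    (hother : ∀ j, 0 ≤ j → j < n → j ≠ a → f j = p2) :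
    ((PySem.List.pyRange 0 n 1).map f).flatten = pvRep a p2 ++ p1 ++ pvRep (n - 1 - a) p2 := by
  have e1 : PySem.List.pyRange 0 n 1
      = PySem.List.pyRange 0 a 1 ++ (a :: PySem.List.pyRange (a + 1) n 1) := by
    rw [PySem.List.pyRange_one_append 0 a n h0 (by omega),
        PySem.List.pyRange_one_cons han]
  rw [e1, List.map_append, List.map_cons, List.flatten_append, List.flatten_cons,
      pv_map_const 0 a f p2 (fun j hj1 hj2 => hother j hj1 (by omega) (by omega)),
      pv_map_const (a + 1) n f p2 (fun j hj1 hj2 => hother j (by omega) hj2 (by omega)),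
      hfa]
  unfold pvRep
  have e2 : a - 0 = a := by ring
  have e3 : n - (a + 1) = n - 1 - a := by ring
  rw [e2, e3, List.append_assoc]

-- flatten of the whole row when f hits p1 exactly at positions a < b
theorem pv_two (n a b : Int) (f : Int → List Char) (p1 p2 : List Char)
    (h0 : 0 ≤ a) (hab : a < b) (hbn : b < n) (hfa : f a = p1) (hfb : f b = p1)
    (hother : ∀ j, 0 ≤ j → j < n → j ≠ a → j ≠ b → f j = p2) :
    ((PySem.List.pyRange 0 n 1).map f).flatten
      = pvRep a p2 ++ p1 ++ pvRep (b - a - 1) p2 ++ p1 ++ pvRep (n - 1 - b) p2 := by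
  have e1 : PySem.List.pyRange 0 n 1
      = PySem.List.pyRange 0 a 1
        ++ (a :: (PySem.List.pyRange (a + 1) b 1 ++ (b :: PySem.List.pyRange (b + 1) n 1))) := by
    rw [PySem.List.pyRange_one_append 0 a n h0 (by omega),
        PySem.List.pyRange_one_cons (show a < n by omega),
        PySem.List.pyRange_one_append (a + 1) b n (by omega) (by omega),
        PySem.List.pyRange_one_cons hbn]
  rw [e1, List.map_append, List.map_cons, List.map_append, List.map_cons,
      List.flatten_append, List.flatten_cons, List.flatten_append, List.flatten_cons,
      pv_map_const 0 a f p2 (fun j hj1 hj2 => hother j hj1 (by omega) (by omega) (by omega)),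
      pv_map_const (a + 1) b f p2 (fun j hj1 hj2 => hother j (by omega) (by omega) (by omega) (by omega)),
      pv_map_const (b + 1) n f p2 (fun j hj1 hj2 => hother j (by omega) hj2 (by omega) (by omega)),
      hfa, hfb]
  unfold pvRep
  have e2 : a - 0 = a := by ring
  have e3 : b - (a + 1) = b - a - 1 := by ring
  have e4 : n - (b + 1) = n - 1 - b := by ring
  rw [e2, e3, e4]
  simp [List.append_assoc]

-- A's inner loop over row i produces exactly B's closed-form row
theorem pv_row_eq (n i : Int) (p1 p2 : List Char) (h0 : 0 ≤ i) (h1 : i < n) :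
    ((PySem.List.pyRange 0 n 1).map
      (fun j => if i = j ∨ i = n - j - 1 then p1 else p2)).flatten = pvRow n i p1 p2 := by
  set f : Int → List Char := fun j => if i = j ∨ i = n - j - 1 then p1 else p2 with hf
  unfold pvRow
  by_cases hab : min i (n - 1 - i) = max i (n - 1 - i)
  · have hc : i = n - 1 - i := by omega
    have hm : min i (n - 1 - i) = i := by omega
    rw [if_pos hab, hm]
    exact pv_one n i f p1 p2 h0 h1 (by simp [hf]) (fun j hj1 hj2 hj3 => by
      have : ¬ (i = j ∨ i = n - j - 1) := by omega
      simp [hf, this])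
  · rw [if_neg hab]
    rcases le_total i (n - 1 - i) with hle | hle
    · have hm : min i (n - 1 - i) = i := by omega
      have hM : max i (n - 1 - i) = n - 1 - i := by omega
      rw [hm, hM]
      exact pv_two n i (n - 1 - i) f p1 p2 h0 (by omega) (by omega)
        (by simp [hf]) (by simp [hf]; omega)
        (fun j hj1 hj2 hj3 hj4 => by
          have : ¬ (i = j ∨ i = n - j - 1) := by omega
          simp [hf, this])
    · have hm : min i (n - 1 - i) = n - 1 - i := by omega
      have hM : max i (n - 1 - i) = i := by omega
      rw [hm, hM]
      exact pv_two n (n - 1 - i) i f p1 p2 (by omega) (by omega) h1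
        (by simp [hf]; omega) (by simp [hf])
        (fun j hj1 hj2 hj3 hj4 => by
          have : ¬ (i = j ∨ i = n - j - 1) := by omega
          simp [hf, this])

theorem pv_main (n : Int) (p1 p2 : String) :
    printBasePattern n p1 p2 = printBasePattern_alt n p1 p2 := by
  unfold printBasePattern printBasePattern_alt
  congr 1
  have hin : ∀ (s : List Char) (i : Int), i ∈ PySem.List.pyRange 0 n 1 →
      ((PySem.List.pyRange 0 n 1).foldl (fun s j =>
        if i = j ∨ i = n - j - 1 then s ++ p1.toList else s ++ p2.toList) s) ++ ['\n']
      = s ++ (pvRow n i p1.toList p2.toList ++ ['\n']) := by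
    intro s i hi
    have hmem := (PySem.List.mem_pyRange_one).1 hi
    have hfold : ((PySem.List.pyRange 0 n 1).foldl (fun s j =>
        if i = j ∨ i = n - j - 1 then s ++ p1.toList else s ++ p2.toList) s)
        = s ++ ((PySem.List.pyRange 0 n 1).map
            (fun j => if i = j ∨ i = n - j - 1 then p1.toList else p2.toList)).flatten := by
      have hfun : (fun (s : List Char) j => if i = j ∨ i = n - j - 1 then s ++ p1.toList else s ++ p2.toList)
          = (fun (s : List Char) j => s ++ (if i = j ∨ i = n - j - 1 then p1.toList else p2.toList)) := by
        funext s j; split <;> rfl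
      rw [hfun, PySem.List.foldl_append_eq_flatMap, List.flatMap_def]
    rw [hfold, pv_row_eq n i p1.toList p2.toList hmem.1 hmem.2, List.append_assoc]
  calc (PySem.List.pyRange 0 n 1).foldl (fun s i =>
        ((PySem.List.pyRange 0 n 1).foldl (fun s j =>
          if i = j ∨ i = n - j - 1 then s ++ p1.toList else s ++ p2.toList) s) ++ ['\n']) []
      = (PySem.List.pyRange 0 n 1).foldl (fun s i =>
          s ++ (pvRow n i p1.toList p2.toList ++ ['\n'])) [] :=
        PySem.List.foldl_congr_mem _ _ _ _ (fun s i hi => hin s i hi)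
    _ = ((PySem.List.pyRange 0 n 1).map (fun i => pvRow n i p1.toList p2.toList ++ ['\n'])).flatten := by
        rw [PySem.List.foldl_append_eq_flatMap, List.flatMap_def]
        simp

-- ===== VERDICT (by name: the statement is the Claim_ definition above) =====
theorem printBasePattern_spec : Claim_equal_printBasePattern := by
  intro n p1 p2 _
  unfold Spec_printBasePattern
  exact pv_main n p1 p2
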